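-- pv_equiv track=rewrite | github.com/rafro/Z_Claw-v2.0 | runtime/skills/story_writer.py | _merge_codex
-- ===== SOURCE A (Python) =====
-- def _merge_codex(bible: dict, data: dict) -> dict:
--     """Add a codex entry — stored in lore_entries with a 'codex' source tag."""
--     entry = {
--         "title": data.get("title", "Untitled Codex"),
--         "category": data.get("category", "character"),
--         "content": data.get("content", ""),
--         "source": "codex",
--     }
--
--     existing_titles = {
--         e.get("title", "").lower()
--         for e in bible.get("lore_entries", [])
--         if e.get("source") == "codex"
--     }
--     if entry["title"].lower() in existing_titles:
--         for i, e in enumerate(bible["lore_entries"]):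
--             if e.get("title", "").lower() == entry["title"].lower() and e.get("source") == "codex":
--                 bible["lore_entries"][i] = entry
--                 break
--     else:
--         bible.setdefault("lore_entries", []).append(entry)
--
--     return bible
-- ===== SOURCE B (Python) =====
-- def _merge_codex(bible: dict, data: dict) -> dict:
--     """Add a codex entry - rebuild lore_entries in one fold with a 'replaced' flag."""
--     entry = {
--         "title": data.get("title", "Untitled Codex"),
--         "category": data.get("category", "character"),
--         "content": data.get("content", ""),
--         "source": "codex",
--     }
--     t = entry["title"].lower()
--     entries = bible.setdefault("lore_entries", [])
--     out, replaced = [], False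
--     for e in entries:
--         if not replaced and e.get("title", "").lower() == t and e.get("source") == "codex":
--             out.append(entry)
--             replaced = True
--         else:
--             out.append(e)
--     if not replaced:
--         out.append(entry)
--     entries[:] = out
--     return bible
-- ===== Notes on version B (the rewrite author's own statement) =====
-- stated objective: alternative
-- what changed: B replaces A's build-a-set-of-codex-titles-then-index-scan-and-assign with a single fold that rebuilds the whole lore_entries list carrying a 'replaced' flag (substituting the new entry at the first codex match, appending it at the end if the flag never flipped), writing the rebuilt list back via slice assignment; no title set, no index loop, no in-place element assignment.
import Mathlib
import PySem

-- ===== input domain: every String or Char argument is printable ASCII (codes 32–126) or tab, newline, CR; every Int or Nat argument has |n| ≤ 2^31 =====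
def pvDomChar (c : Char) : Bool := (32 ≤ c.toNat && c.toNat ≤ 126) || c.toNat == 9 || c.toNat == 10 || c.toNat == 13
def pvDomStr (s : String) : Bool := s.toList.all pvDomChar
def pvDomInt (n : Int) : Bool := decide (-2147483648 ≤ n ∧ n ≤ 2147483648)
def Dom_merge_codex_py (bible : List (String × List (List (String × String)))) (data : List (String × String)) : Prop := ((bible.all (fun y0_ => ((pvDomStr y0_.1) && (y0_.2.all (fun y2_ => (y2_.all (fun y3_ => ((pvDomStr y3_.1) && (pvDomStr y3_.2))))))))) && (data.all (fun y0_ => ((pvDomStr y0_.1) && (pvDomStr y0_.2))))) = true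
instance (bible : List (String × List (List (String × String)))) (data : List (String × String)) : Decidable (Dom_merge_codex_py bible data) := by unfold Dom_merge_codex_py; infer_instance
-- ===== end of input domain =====

-- B rebuilds lore_entries in ONE fold carrying a 'replaced' flag (new entry substituted at the
-- first codex match, appended at the end if the flag never flipped), instead of A's title-set
-- build followed by an index scan with in-place assignment: alternative decomposition.
-- Both Pythons mutate `bible` in place to the same final state; theorems are about the return value.

-- ===== PORT A =====
-- the inner `for i, e in enumerate(...): ... break` loop of A, reached only when a match exists
def pvReplaceFirstA (t : String) (entry : List (String × String)) :
    List (List (String × String)) → List (List (String × String))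
  | [] => []
  | e :: rest =>
    if PySem.Str.lower ((PySem.Dict.mk e).getD "title" "") == t
        && (PySem.Dict.mk e).get? "source" == some "codex" then
      entry :: rest
    else
      e :: pvReplaceFirstA t entry rest

def merge_codex_py (bible : List (String × List (List (String × String)))) (data : List (String × String)) : List (String × List (List (String × String))) :=
  let bibleD := PySem.Dict.mk bible
  let dataD := PySem.Dict.mk data
  let entry : List (String × String) :=
    [("title", dataD.getD "title" "Untitled Codex"),
     ("category", dataD.getD "category" "character"),
     ("content", dataD.getD "content" ""),
     ("source", "codex")]
  let entryTitle := dataD.getD "title" "Untitled Codex"  -- entry["title"]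
  let entries := bibleD.getD "lore_entries" []
  let existingTitles : PySem.Set String :=
    PySem.Set.ofList ((entries.filter
      (fun e => (PySem.Dict.mk e).get? "source" == some "codex")).map
      (fun e => PySem.Str.lower ((PySem.Dict.mk e).getD "title" "")))
  if PySem.Set.contains existingTitles (PySem.Str.lower entryTitle) then
    (bibleD.insert "lore_entries" (pvReplaceFirstA (PySem.Str.lower entryTitle) entry entries)).items
  else
    let d' := bibleD.setdefault "lore_entries" []
    (d'.insert "lore_entries" (d'.getD "lore_entries" [] ++ [entry])).items

-- ===== PORT B =====
def merge_codex_py_alt (bible : List (String × List (List (String × String)))) (data : List (String × String)) : List (String × List (List (String × String))) :=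
  let bibleD := PySem.Dict.mk bible
  let dataD := PySem.Dict.mk data
  let entry : List (String × String) :=
    [("title", dataD.getD "title" "Untitled Codex"),
     ("category", dataD.getD "category" "character"),
     ("content", dataD.getD "content" ""),
     ("source", "codex")]
  let t := PySem.Str.lower (dataD.getD "title" "Untitled Codex")
  let d' := bibleD.setdefault "lore_entries" []
  let entries := d'.getD "lore_entries" []
  -- `for e in entries: …` accumulating (out, replaced)
  let st := entries.foldl
    (fun (acc : List (List (String × String)) × Bool) e =>
      if !acc.2 && (PySem.Str.lower ((PySem.Dict.mk e).getD "title" "") == t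
          && (PySem.Dict.mk e).get? "source" == some "codex") then
        (acc.1 ++ [entry], true)
      else
        (acc.1 ++ [e], acc.2))
    ([], false)
  let final := if st.2 then st.1 else st.1 ++ [entry]
  -- `entries[:] = out` : the live list under "lore_entries" becomes `final`
  (d'.insert "lore_entries" final).items

-- ===== PRECONDITION & SPEC =====
def Spec_merge_codex_py (bible : List (String × List (List (String × String)))) (data : List (String × String)) (out : List (String × List (List (String × String)))) : Prop := out = merge_codex_py_alt bible data
instance (bible : List (String × List (List (String × String)))) (data : List (String × String)) (out : List (String × List (List (String × String)))) : Decidable (Spec_merge_codex_py bible data out) := by unfold Spec_merge_codex_py; infer_instance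

-- ===== CLAIM (what is proved, stated in full; the proofs are below) =====
def Claim_equal_merge_codex_py : Prop := ∀ (bible : List (String × List (List (String × String)))) (data : List (String × String)), Dom_merge_codex_py bible data → Spec_merge_codex_py bible data (merge_codex_py bible data)

-- ===== LEMMAS AND PROOFS =====

-- once the flag is set, B's fold just copies the rest of the list
theorem pv_fold_true (t : String) (entry : List (String × String))
    (l : List (List (String × String))) (acc : List (List (String × String))) :
    l.foldl
      (fun (acc : List (List (String × String)) × Bool) e =>
        if !acc.2 && (PySem.Str.lower ((PySem.Dict.mk e).getD "title" "") == t
            && (PySem.Dict.mk e).get? "source" == some "codex") then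
          (acc.1 ++ [entry], true)
        else
          (acc.1 ++ [e], acc.2))
      (acc, true) = (acc ++ l, true) := by
  induction l generalizing acc with
  | nil => simp
  | cons e rest ih =>
    rw [List.foldl_cons]
    exact (ih (acc ++ [e])).trans (by simp)

-- B's fold from a clear flag: first-match replacement if a codex match exists, else a plain copy
theorem pv_fold_false (t : String) (entry : List (String × String))
    (l : List (List (String × String))) (acc : List (List (String × String))) :
    l.foldl
      (fun (acc : List (List (String × String)) × Bool) e =>
        if !acc.2 && (PySem.Str.lower ((PySem.Dict.mk e).getD "title" "") == t
            && (PySem.Dict.mk e).get? "source" == some "codex") then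
          (acc.1 ++ [entry], true)
        else
          (acc.1 ++ [e], acc.2))
      (acc, false) =
      if l.any (fun e => PySem.Str.lower ((PySem.Dict.mk e).getD "title" "") == t
          && (PySem.Dict.mk e).get? "source" == some "codex") then
        (acc ++ pvReplaceFirstA t entry l, true)
      else (acc ++ l, false) := by
  induction l generalizing acc with
  | nil => simp
  | cons e rest ih =>
    rw [List.foldl_cons]
    by_cases h : (PySem.Str.lower ((PySem.Dict.mk e).getD "title" "") == t
        && (PySem.Dict.mk e).get? "source" == some "codex") = true
    · rw [show (if !((acc, false) : List (List (String × String)) × Bool).2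
          && (PySem.Str.lower ((PySem.Dict.mk e).getD "title" "") == t
            && (PySem.Dict.mk e).get? "source" == some "codex") then
          (((acc, false) : List (List (String × String)) × Bool).1 ++ [entry], true)
        else (((acc, false) : List (List (String × String)) × Bool).1 ++ [e],
          ((acc, false) : List (List (String × String)) × Bool).2))
        = (acc ++ [entry], true) from by simp [h]]
      rw [pv_fold_true]
      simp [pvReplaceFirstA, h]
    · rw [show (if !((acc, false) : List (List (String × String)) × Bool).2
          && (PySem.Str.lower ((PySem.Dict.mk e).getD "title" "") == t
            && (PySem.Dict.mk e).get? "source" == some "codex") then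
          (((acc, false) : List (List (String × String)) × Bool).1 ++ [entry], true)
        else (((acc, false) : List (List (String × String)) × Bool).1 ++ [e],
          ((acc, false) : List (List (String × String)) × Bool).2))
        = (acc ++ [e], false) from by simp [h]]
      rw [ih]
      by_cases hr : rest.any (fun e => PySem.Str.lower ((PySem.Dict.mk e).getD "title" "") == t
          && (PySem.Dict.mk e).get? "source" == some "codex") = true
      · simp [h, hr, pvReplaceFirstA]
      · simp [h, hr]

-- membership of the lowered title in A's codex-title set = existence of a matching codex entry
theorem pv_contains_eq_any (t : String) (l : List (List (String × String))) :
    PySem.Set.contains (PySem.Set.ofList ((l.filter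
      (fun e => (PySem.Dict.mk e).get? "source" == some "codex")).map
      (fun e => PySem.Str.lower ((PySem.Dict.mk e).getD "title" "")))) t
    = l.any (fun e => PySem.Str.lower ((PySem.Dict.mk e).getD "title" "") == t
        && (PySem.Dict.mk e).get? "source" == some "codex") := by
  rw [Bool.eq_iff_iff]
  simp only [PySem.Set.contains_iff, PySem.Set.mem_ofList, List.mem_map, List.mem_filter,
    List.any_eq_true, Bool.and_eq_true, beq_iff_eq]
  constructor
  · rintro ⟨e, ⟨he, hs⟩, ht⟩; exact ⟨e, he, ht, by simpa using hs⟩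
  · rintro ⟨e, he, ht, hs⟩; exact ⟨e, ⟨he, by simpa using hs⟩, ht⟩

-- if any codex entry matches, the "lore_entries" key is present
theorem pv_contains_key_of_any (d : PySem.Dict String (List (List (String × String)))) (t : String)
    (h : (d.getD "lore_entries" []).any
      (fun e => PySem.Str.lower ((PySem.Dict.mk e).getD "title" "") == t
        && (PySem.Dict.mk e).get? "source" == some "codex") = true) :
    d.contains "lore_entries" = true := by
  by_cases hc : d.contains "lore_entries" = true
  · exact hc
  · exfalso
    have hn : d.get? "lore_entries" = none :=
      (PySem.Dict.get?_eq_none_iff_contains _ _).mpr (Bool.eq_false_iff.mpr hc)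
    rw [PySem.Dict.getD, hn] at h
    simp at h

-- the whole merge, for an arbitrary dict, lowered title and fresh entry
theorem pv_main (d : PySem.Dict String (List (List (String × String))))
    (t : String) (entry : List (String × String)) :
    (if PySem.Set.contains (PySem.Set.ofList (((d.getD "lore_entries" []).filter
        (fun e => (PySem.Dict.mk e).get? "source" == some "codex")).map
        (fun e => PySem.Str.lower ((PySem.Dict.mk e).getD "title" "")))) t then
      (d.insert "lore_entries" (pvReplaceFirstA t entry (d.getD "lore_entries" []))).items
    else
      ((d.setdefault "lore_entries" []).insert "lore_entries"
        ((d.setdefault "lore_entries" []).getD "lore_entries" [] ++ [entry])).items)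
    =
    ((d.setdefault "lore_entries" []).insert "lore_entries"
      (let st := ((d.setdefault "lore_entries" []).getD "lore_entries" []).foldl
        (fun (acc : List (List (String × String)) × Bool) e =>
          if !acc.2 && (PySem.Str.lower ((PySem.Dict.mk e).getD "title" "") == t
              && (PySem.Dict.mk e).get? "source" == some "codex") then
            (acc.1 ++ [entry], true)
          else
            (acc.1 ++ [e], acc.2))
        ([], false)
       if st.2 then st.1 else st.1 ++ [entry])).items := by
  have hget : (d.setdefault "lore_entries" ([] : List (List (String × String)))).getD "lore_entries" []
      = d.getD "lore_entries" [] := PySem.Dict.getD_setdefault_self d "lore_entries" [] []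
  rw [pv_contains_eq_any]
  by_cases hany : (d.getD "lore_entries" []).any
      (fun e => PySem.Str.lower ((PySem.Dict.mk e).getD "title" "") == t
        && (PySem.Dict.mk e).get? "source" == some "codex") = true
  · have hsd : d.setdefault "lore_entries" ([] : List (List (String × String))) = d :=
      PySem.Dict.setdefault_of_contains _ _ (pv_contains_key_of_any d t hany)
    rw [if_pos hany, hsd]
    simp only [pv_fold_false, hany, if_pos]
    simp
  · rw [if_neg hany]
    simp only [hget, pv_fold_false, hany]
    simp

-- ===== VERDICT (by name: the statement is the Claim_ definition above) =====
theorem merge_codex_py_spec : Claim_equal_merge_codex_py := by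
  intro bible data _
  unfold Spec_merge_codex_py merge_codex_py merge_codex_py_alt
  exact pv_main (PySem.Dict.mk bible)
    (PySem.Str.lower ((PySem.Dict.mk data).getD "title" "Untitled Codex"))
    [("title", (PySem.Dict.mk data).getD "title" "Untitled Codex"),
     ("category", (PySem.Dict.mk data).getD "category" "character"),
     ("content", (PySem.Dict.mk data).getD "content" ""),
     ("source", "codex")]
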